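-- pv_equiv track=rewrite | github.com/nastyh/LeetCode | 2554_max_number_of_integers_to_choose_from_a_range_I.py | maxCount_binary_search
-- ===== SOURCE A (Python) =====
-- from typing import List
--
-- def maxCount_binary_search(banned: List[int], n: int, maxSum: int) -> int:
--     """
--     O((m+n)logm)
--     O(m)
--     m elements runs n times
--     Sort banned
--     for each number check if the curr number matches something from the banned list
--     """
--     def _helper(target):
--         l, r = 0, len(banned) - 1
--         while l <= r:
--             m = l + (r -l) // 2
--             if banned[m] == target:
--                 return True
--             elif target < banned[m]:
--                 r = m - 1
--             else:
--                 l = m + 1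
--         return False
--     banned = sorted(banned)
--     res, curr_sum = 0, 0
--     for num in range(1, n + 1):
--         if _helper(num):
--             continue
--         if curr_sum + num <= maxSum:
--             curr_sum += num
--             res += 1
--         else:
--             return res
--     return res
-- ===== SOURCE B (Python) =====
-- def maxCount_binary_search(banned, n, maxSum):
--     walls = sorted(set(x for x in banned if 1 <= x <= n))
--     res, rem = 0, maxSum
--     lo = 1
--     for w in walls + [n + 1]:
--         hi = w - 1
--         if lo <= hi:
--             total = (lo + hi) * (hi - lo + 1) // 2
--             if total <= rem:
--                 res += hi - lo + 1
--                 rem -= total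
--             else:
--                 a, b = 0, hi - lo + 1
--                 while a < b:
--                     mid = (a + b + 1) // 2
--                     if mid * lo + mid * (mid - 1) // 2 <= rem:
--                         a = mid
--                     else:
--                         b = mid - 1
--                 return res + a
--         lo = w + 1
--     return res
-- ===== Notes on version B (the rewrite author's own statement) =====
-- stated objective: alternative
-- what changed: Replaces A's scan over every integer in [1,n] with a per-number binary search in the sorted banned list by a gap walk over the sorted, deduplicated, clipped banned values: each maximal run of allowed integers is consumed with an arithmetic-series sum, and in the run where the budget is exhausted the count is found by binary search on the count, so the work depends only on the banned-list size m, not on n.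
import Mathlib
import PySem

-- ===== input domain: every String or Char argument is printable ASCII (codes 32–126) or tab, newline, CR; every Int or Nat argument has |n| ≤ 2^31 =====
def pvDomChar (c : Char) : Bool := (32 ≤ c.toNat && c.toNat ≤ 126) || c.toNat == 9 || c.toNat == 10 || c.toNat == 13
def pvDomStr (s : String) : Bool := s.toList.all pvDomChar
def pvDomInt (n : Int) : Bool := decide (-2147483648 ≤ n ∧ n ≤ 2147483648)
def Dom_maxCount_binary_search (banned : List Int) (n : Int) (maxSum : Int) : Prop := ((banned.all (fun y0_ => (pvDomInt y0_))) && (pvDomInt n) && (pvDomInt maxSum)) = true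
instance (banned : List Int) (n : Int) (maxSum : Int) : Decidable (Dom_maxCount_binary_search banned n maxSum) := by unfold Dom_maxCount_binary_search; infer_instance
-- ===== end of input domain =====

-- B replaces A's number-by-number scan of [1, n] (with a binary search in the sorted banned
-- list per number) by a gap walk over the sorted deduplicated banned values clipped to [1, n]:
-- arithmetic-series sums per gap, and binary search on the count in the gap where the budget runs out.

-- ===== PORT A =====
-- A's _helper: iterative binary search, ported as recursion on the shrinking interval [l, r].
-- banned[m] is ported with pyGetD (default 0): for every call A makes, 0 ≤ l ≤ m ≤ r < len(banned),
-- so the index is always in range and pyGetD is exact there.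
def pvBSearch (banned : List Int) (target : Int) (l r : Int) : Bool :=
  if _h : l ≤ r then
    let m := l + PySem.Int.floordiv (r - l) 2
    let v := PySem.List.pyGetD banned m 0
    if v == target then true
    else if target < v then pvBSearch banned target l (m - 1)
    else pvBSearch banned target (m + 1) r
  else false
termination_by (r + 1 - l).toNat
decreasing_by
  · have h2 : PySem.Int.floordiv (r - l) 2 = (r - l) / 2 :=
      PySem.Int.floordiv_eq_ediv_of_pos (by omega)
    simp only [h2]; omega
  · have h2 : PySem.Int.floordiv (r - l) 2 = (r - l) / 2 :=
      PySem.Int.floordiv_eq_ediv_of_pos (by omega)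
    simp only [h2]; omega

-- A's main loop 'for num in range(1, n + 1)': Python's range is LAZY, so it is ported as a
-- counting recursion on num (state res, curr_sum; early return on budget overflow).
def pvALoop (b : List Int) (n maxSum : Int) (num res curr : Int) : Int :=
  if _h : num ≤ n then
    if pvBSearch b num 0 ((b.length : Int) - 1) then pvALoop b n maxSum (num + 1) res curr
    else if curr + num ≤ maxSum then pvALoop b n maxSum (num + 1) (res + 1) (curr + num)
    else res
  else res
termination_by (n + 1 - num).toNat

def maxCount_binary_search (banned : List Int) (n : Int) (maxSum : Int) : Int :=
  let b := PySem.List.sorted banned (fun x => x) false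
  pvALoop b n maxSum 1 0 0

-- ===== PORT B =====
-- B's inner 'while a < b' loop: binary search for the largest count a whose series sum fits.
def pvKSearch (lo rem a b : Int) : Int :=
  if _h : a < b then
    let mid := PySem.Int.floordiv (a + b + 1) 2
    if mid * lo + PySem.Int.floordiv (mid * (mid - 1)) 2 ≤ rem then pvKSearch lo rem mid b
    else pvKSearch lo rem a (mid - 1)
  else a
termination_by (b - a).toNat
decreasing_by
  · have h2 : PySem.Int.floordiv (a + b + 1) 2 = (a + b + 1) / 2 :=
      PySem.Int.floordiv_eq_ediv_of_pos (by omega)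
    simp only [h2]; omega
  · have h2 : PySem.Int.floordiv (a + b + 1) 2 = (a + b + 1) / 2 :=
      PySem.Int.floordiv_eq_ediv_of_pos (by omega)
    simp only [h2]; omega

-- B's 'for w in walls + [n + 1]' loop: state (res, rem, lo), early return in the gap
-- where the budget is exhausted.
def pvBLoop (n maxSum : Int) : List Int → Int → Int → Int → Int
  | [], res, _rem, _lo => res
  | w :: ws, res, rem, lo =>
    let hi := w - 1
    if lo ≤ hi then
      let total := PySem.Int.floordiv ((lo + hi) * (hi - lo + 1)) 2
      if total ≤ rem then pvBLoop n maxSum ws (res + (hi - lo + 1)) (rem - total) (w + 1)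
      else res + pvKSearch lo rem 0 (hi - lo + 1)
    else pvBLoop n maxSum ws res rem (w + 1)

def maxCount_binary_search_alt (banned : List Int) (n : Int) (maxSum : Int) : Int :=
  let walls := PySem.List.sorted
    (PySem.Set.ofList (banned.filter (fun x => decide (1 ≤ x) && decide (x ≤ n))))
    (fun x => x) false
  pvBLoop n maxSum (walls ++ [n + 1]) 0 maxSum 1

-- ===== PRECONDITION & SPEC =====
def Spec_maxCount_binary_search (banned : List Int) (n : Int) (maxSum : Int) (out : Int) : Prop := out = maxCount_binary_search_alt banned n maxSum
instance (banned : List Int) (n : Int) (maxSum : Int) (out : Int) : Decidable (Spec_maxCount_binary_search banned n maxSum out) := by unfold Spec_maxCount_binary_search; infer_instance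

-- ===== CLAIM (what is proved, stated in full; the proofs are below) =====
def Claim_equal_maxCount_binary_search : Prop := ∀ (banned : List Int) (n : Int) (maxSum : Int), Dom_maxCount_binary_search banned n maxSum → Spec_maxCount_binary_search banned n maxSum (maxCount_binary_search banned n maxSum)

-- ===== LEMMAS AND PROOFS =====

-- Binary search on a sorted list finds target iff some position in [l, r] holds it.
theorem pvBSearch_iff (b : List Int) (hs : b.Pairwise (· ≤ ·)) (t : Int) :
    ∀ (k : Nat) (l r : Int), (r + 1 - l).toNat ≤ k → 0 ≤ l → r < (b.length : Int) →
      (pvBSearch b t l r = true ↔ ∃ i : Nat, l ≤ (i : Int) ∧ (i : Int) ≤ r ∧ b[i]? = some t) := by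
  intro k
  induction k with
  | zero =>
    intro l r hk hl hr
    rw [pvBSearch]
    have : ¬ l ≤ r := by omega
    rw [dif_neg this]
    simp only [Bool.false_eq_true, false_iff]
    rintro ⟨i, h1, h2, _⟩; omega
  | succ k ih =>
    intro l r hk hl hr
    rw [pvBSearch]
    by_cases hlr : l ≤ r
    · simp only [hlr, dif_pos]
      have h2 : PySem.Int.floordiv (r - l) 2 = (r - l) / 2 :=
        PySem.Int.floordiv_eq_ediv_of_pos (by omega)
      set m : Int := l + PySem.Int.floordiv (r - l) 2 with hm
      have hmb : l ≤ m ∧ m ≤ r := by rw [hm, h2]; omega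
      have hmlen : m.toNat < b.length := by omega
      have hv : PySem.List.pyGetD b m 0 = b[m.toNat] :=
        PySem.List.pyGetD_eq_getElem b 0 (by omega) (by omega)
      set v : Int := PySem.List.pyGetD b m 0 with hvdef
      have hmono : ∀ (i j : Nat) (hi : i < b.length) (hj : j < b.length), i ≤ j → b[i] ≤ b[j] := by
        intro i j hi hj hij
        rcases Nat.lt_or_ge i j with h | h
        · exact (List.pairwise_iff_getElem.mp hs) i j hi hj h
        · have : i = j := by omega
          subst this; exact le_refl _
      by_cases hvt : v = t
      · simp only [hvt, beq_self_eq_true, if_true]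
        constructor
        · intro _
          exact ⟨m.toNat, by omega, by omega, by
            rw [List.getElem?_eq_getElem hmlen]; rw [← hvt, hv]⟩
        · intro _; trivial
      · have hne : (v == t) = false := by simp [hvt]
        simp only [hne, Bool.false_eq_true, if_false]
        by_cases htv : t < v
        · simp only [htv, if_true]
          rw [ih l (m - 1) (by omega) hl (by omega)]
          constructor
          · rintro ⟨i, h1, h2, h3⟩; exact ⟨i, h1, by omega, h3⟩
          · rintro ⟨i, h1, h2, h3⟩
            refine ⟨i, h1, ?_, h3⟩
            by_contra hbad
            have him : m ≤ (i : Int) := by omega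
            have hilen : i < b.length := by
              rcases List.getElem?_eq_some_iff.mp h3 with ⟨hh, _⟩; exact hh
            have : b[m.toNat] ≤ b[i] := hmono m.toNat i hmlen hilen (by omega)
            have hbi : b[i] = t := by
              rcases List.getElem?_eq_some_iff.mp h3 with ⟨hh, he⟩; exact he
            rw [hbi] at this; rw [hv] at htv; omega
        · simp only [htv, if_false]
          have hvlt : v < t := by
            rcases lt_trichotomy v t with h | h | h
            · exact h
            · exact absurd h hvt
            · exact absurd h htv
          rw [ih (m + 1) r (by omega) (by omega) hr]
          constructor
          · rintro ⟨i, h1, h2, h3⟩; exact ⟨i, by omega, h2, h3⟩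
          · rintro ⟨i, h1, h2, h3⟩
            refine ⟨i, ?_, h2, h3⟩
            by_contra hbad
            have : (i : Int) ≤ m := by omega
            have hilen : i < b.length := by
              rcases List.getElem?_eq_some_iff.mp h3 with ⟨hh, _⟩; exact hh
            have : b[i] ≤ b[m.toNat] := hmono i m.toNat hilen hmlen (by omega)
            have hbi : b[i] = t := by
              rcases List.getElem?_eq_some_iff.mp h3 with ⟨hh, he⟩; exact he
            rw [hbi] at this; rw [hv] at hvlt; omega
    · rw [dif_neg hlr]
      simp only [Bool.false_eq_true, false_iff]
      rintro ⟨i, h1, h2, _⟩; omega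

-- A's membership test over the sorted banned list is membership in banned.
theorem pvBSearch_mem (banned : List Int) (t : Int) :
    (pvBSearch (PySem.List.sorted banned (fun x => x) false) t 0
      (((PySem.List.sorted banned (fun x => x) false).length : Int) - 1) = true) ↔ t ∈ banned := by
  set b := PySem.List.sorted banned (fun x => x) false with hb
  have hs : b.Pairwise (· ≤ ·) := by
    have := PySem.List.sorted_pairwise banned (fun x => x)
    simpa using this
  rw [pvBSearch_iff b hs t (b.length + 1) 0 ((b.length : Int) - 1) (by omega) (by omega) (by omega)]
  constructor
  · rintro ⟨i, _, _, h3⟩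
    have hmem : t ∈ b := by
      rcases List.getElem?_eq_some_iff.mp h3 with ⟨hh, he⟩
      exact he ▸ List.getElem_mem hh
    exact (PySem.List.mem_sorted _ _ _ _).mp hmem
  · intro h
    have hmem : t ∈ b := (PySem.List.mem_sorted _ _ _ _).mpr h
    rcases List.mem_iff_getElem.mp hmem with ⟨i, hi, he⟩
    exact ⟨i, by omega, by omega, by rw [List.getElem?_eq_getElem hi, he]⟩

-- sum of the k consecutive integers lo, lo+1, …, lo+k-1 as B computes it
def pvFsum (lo k : Int) : Int := k * lo + PySem.Int.floordiv (k * (k - 1)) 2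

theorem pvFsum_succ (lo k : Int) (_hk : 0 ≤ k) : pvFsum lo (k + 1) = pvFsum lo k + (lo + k) := by
  unfold pvFsum
  rw [PySem.Int.floordiv_eq_ediv_of_pos (by omega : (0:Int) < 2),
      PySem.Int.floordiv_eq_ediv_of_pos (by omega : (0:Int) < 2)]
  have h1 : (k + 1) * (k + 1 - 1) = k * (k - 1) + k * 2 := by ring
  rw [h1, Int.add_mul_ediv_right _ _ (by omega : (2:Int) ≠ 0)]
  ring

theorem pvFsum_zero (lo : Int) : pvFsum lo 0 = 0 := by
  unfold pvFsum
  norm_num [PySem.Int.floordiv_eq_ediv_of_pos (by omega : (0:Int) < 2)]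

theorem pvFsum_one (lo : Int) : pvFsum lo 1 = lo := by
  have h := pvFsum_succ lo 0 (by omega)
  rw [pvFsum_zero] at h
  norm_num at h
  exact h

theorem pvFsum_shift (lo k : Int) (_hk : 1 ≤ k) : pvFsum lo k = lo + pvFsum (lo + 1) (k - 1) := by
  unfold pvFsum
  rw [PySem.Int.floordiv_eq_ediv_of_pos (by omega : (0:Int) < 2),
      PySem.Int.floordiv_eq_ediv_of_pos (by omega : (0:Int) < 2)]
  have h1 : k * (k - 1) = (k - 1) * (k - 1 - 1) + (k - 1) * 2 := by ring
  rw [h1, Int.add_mul_ediv_right _ _ (by omega : (2:Int) ≠ 0)]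
  ring

theorem pvFsum_mono (lo : Int) (hlo : 1 ≤ lo) :
    ∀ (d : Nat) (j : Int), 0 ≤ j → pvFsum lo j ≤ pvFsum lo (j + d) := by
  intro d
  induction d with
  | zero => intro j hj; simp
  | succ d ih =>
    intro j hj
    have h1 := ih j hj
    have h2 := pvFsum_succ lo (j + d) (by omega)
    have : (j : Int) + (d + 1 : Nat) = (j + d) + 1 := by push_cast; ring
    rw [this, h2]
    omega

theorem pvFsum_le (lo j k : Int) (hlo : 1 ≤ lo) (hj : 0 ≤ j) (hjk : j ≤ k) :
    pvFsum lo j ≤ pvFsum lo k := by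
  have hd : k = j + ((k - j).toNat : Int) := by omega
  rw [hd]
  exact pvFsum_mono lo hlo (k - j).toNat j hj

-- the gap total B computes is the series sum
theorem pvTotal_eq (lo hi : Int) :
    PySem.Int.floordiv ((lo + hi) * (hi - lo + 1)) 2 = pvFsum lo (hi - lo + 1) := by
  unfold pvFsum
  rw [PySem.Int.floordiv_eq_ediv_of_pos (by omega : (0:Int) < 2),
      PySem.Int.floordiv_eq_ediv_of_pos (by omega : (0:Int) < 2)]
  have h1 : (lo + hi) * (hi - lo + 1) = (hi - lo + 1) * (hi - lo + 1 - 1) + ((hi - lo + 1) * lo) * 2 := by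
    ring
  rw [h1, Int.add_mul_ediv_right _ _ (by omega : (2:Int) ≠ 0)]
  ring

-- what B's inner binary search returns: bounds + threshold properties
theorem pvKSearch_spec (lo rem : Int) :
    ∀ (d : Nat) (a b : Int), (b - a).toNat ≤ d → a ≤ b →
      a ≤ pvKSearch lo rem a b ∧ pvKSearch lo rem a b ≤ b ∧
      (pvFsum lo (pvKSearch lo rem a b) ≤ rem ∨ pvKSearch lo rem a b = a) ∧
      (pvKSearch lo rem a b = b ∨ ¬ pvFsum lo (pvKSearch lo rem a b + 1) ≤ rem) := by
  intro d
  induction d with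
  | zero =>
    intro a b hd hab
    have : ¬ a < b := by omega
    rw [pvKSearch, dif_neg this]
    refine ⟨le_refl a, hab, Or.inr rfl, Or.inl (by omega)⟩
  | succ d ih =>
    intro a b hd hab
    rw [pvKSearch]
    by_cases hab' : a < b
    · rw [dif_pos hab']
      have h2 : PySem.Int.floordiv (a + b + 1) 2 = (a + b + 1) / 2 :=
        PySem.Int.floordiv_eq_ediv_of_pos (by omega)
      set mid : Int := PySem.Int.floordiv (a + b + 1) 2 with hmid
      have hmb : a < mid ∧ mid ≤ b := by rw [h2]; omega
      have hPmid : mid * lo + PySem.Int.floordiv (mid * (mid - 1)) 2 = pvFsum lo mid := rfl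
      by_cases hP : mid * lo + PySem.Int.floordiv (mid * (mid - 1)) 2 ≤ rem
      · rw [if_pos hP]
        obtain ⟨q1, q2, q3, q4⟩ := ih mid b (by omega) (by omega)
        refine ⟨by omega, q2, ?_, q4⟩
        rcases q3 with h | h
        · exact Or.inl h
        · rw [h]; rw [hPmid] at hP; exact Or.inl hP
      · rw [if_neg hP]
        obtain ⟨q1, q2, q3, q4⟩ := ih a (mid - 1) (by omega) (by omega)
        refine ⟨q1, by omega, q3, ?_⟩
        rcases q4 with h | h
        · rw [hPmid] at hP
          right
          have : pvKSearch lo rem a (mid - 1) + 1 = mid := by omega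
          rw [this]; exact hP
        · exact Or.inr h
    · rw [dif_neg hab']
      have : a = b := by omega
      refine ⟨le_refl a, by omega, Or.inr rfl, Or.inl this⟩

-- A walks through a banned-free gap [lo, hi] whose total fits the remaining budget.
theorem pvALoop_gap_fit (b banned : List Int) (n maxSum : Int)
    (hmem : ∀ x, (pvBSearch b x 0 ((b.length : Int) - 1) = true) ↔ x ∈ banned) :
    ∀ (d : Nat) (lo hi res curr : Int), (hi + 1 - lo).toNat ≤ d →
      1 ≤ lo → lo ≤ hi + 1 → hi ≤ n →
      (∀ x, lo ≤ x → x ≤ hi → x ∉ banned) →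
      pvFsum lo (hi + 1 - lo) ≤ maxSum - curr →
      pvALoop b n maxSum lo res curr
        = pvALoop b n maxSum (hi + 1) (res + (hi + 1 - lo)) (curr + pvFsum lo (hi + 1 - lo)) := by
  intro d
  induction d with
  | zero =>
    intro lo hi res curr hd h1 h2 h3 hnb hfit
    have hlohi : lo = hi + 1 := by omega
    subst hlohi
    simp [pvFsum_zero]
  | succ d ih =>
    intro lo hi res curr hd h1 h2 h3 hnb hfit
    by_cases hle : lo ≤ hi
    · have hs1 : (1:Int) ≤ hi + 1 - lo := by omega
      have hnum : lo ≤ n := by omega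
      rw [pvALoop, dif_pos hnum]
      have hnotb : ¬ (pvBSearch b lo 0 ((b.length : Int) - 1) = true) := by
        rw [hmem]; exact hnb lo (le_refl lo) hle
      rw [Bool.not_eq_true] at hnotb
      rw [hnotb]
      simp only [Bool.false_eq_true, if_false]
      have hlo_fit : curr + lo ≤ maxSum := by
        have := pvFsum_le lo 1 (hi + 1 - lo) h1 (by omega) hs1
        rw [pvFsum_one] at this
        omega
      rw [if_pos hlo_fit]
      have hshift := pvFsum_shift lo (hi + 1 - lo) hs1
      have hrec := ih (lo + 1) hi (res + 1) (curr + lo) (by omega) (by omega) (by omega) h3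
        (fun x hx1 hx2 => hnb x (by omega) hx2)
        (by
          have : hi + 1 - (lo + 1) = hi + 1 - lo - 1 := by ring
          rw [this]; omega)
      rw [hrec]
      have e1 : hi + 1 - (lo + 1) = hi + 1 - lo - 1 := by ring
      rw [e1] at *
      congr 1
      · omega
      · omega
    · have hlohi : lo = hi + 1 := by omega
      subst hlohi
      simp [pvFsum_zero]
-- A stops inside a banned-free gap [lo, hi]: it returns res + k for the threshold k.
theorem pvALoop_gap_stop (b banned : List Int) (n maxSum : Int)
    (hmem : ∀ x, (pvBSearch b x 0 ((b.length : Int) - 1) = true) ↔ x ∈ banned) :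
    ∀ (d : Nat) (k lo hi res curr : Int), k.toNat ≤ d →
      1 ≤ lo → lo ≤ hi → hi ≤ n →
      (∀ x, lo ≤ x → x ≤ hi → x ∉ banned) →
      0 ≤ k → k < hi + 1 - lo →
      (pvFsum lo k ≤ maxSum - curr ∨ k = 0) →
      ¬ pvFsum lo (k + 1) ≤ maxSum - curr →
      pvALoop b n maxSum lo res curr = res + k := by
  intro d
  induction d with
  | zero =>
    intro k lo hi res curr hd h1 h2 h3 hnb hk0 hks hP hnP
    have hk : k = 0 := by omega
    subst hk
    rw [pvALoop, dif_pos (by omega : lo ≤ n)]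
    have hnotb : pvBSearch b lo 0 ((b.length : Int) - 1) = false := by
      rw [← Bool.not_eq_true, hmem]; exact hnb lo (le_refl lo) h2
    rw [hnotb]
    simp only [Bool.false_eq_true, if_false]
    have : ¬ curr + lo ≤ maxSum := by
      have e := pvFsum_one lo
      rw [(by omega : (0:Int) + 1 = 1), e] at hnP
      omega
    rw [if_neg this]
    omega
  | succ d ih =>
    intro k lo hi res curr hd h1 h2 h3 hnb hk0 hks hP hnP
    by_cases hk : k = 0
    · subst hk
      rw [pvALoop, dif_pos (by omega : lo ≤ n)]
      have hnotb : pvBSearch b lo 0 ((b.length : Int) - 1) = false := by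
        rw [← Bool.not_eq_true, hmem]; exact hnb lo (le_refl lo) h2
      rw [hnotb]
      simp only [Bool.false_eq_true, if_false]
      have : ¬ curr + lo ≤ maxSum := by
        have e := pvFsum_one lo
        rw [(by omega : (0:Int) + 1 = 1), e] at hnP
        omega
      rw [if_neg this]
      omega
    · have hk1 : 1 ≤ k := by omega
      rw [pvALoop, dif_pos (by omega : lo ≤ n)]
      have hnotb : pvBSearch b lo 0 ((b.length : Int) - 1) = false := by
        rw [← Bool.not_eq_true, hmem]; exact hnb lo (le_refl lo) h2
      rw [hnotb]
      simp only [Bool.false_eq_true, if_false]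
      have hPk : pvFsum lo k ≤ maxSum - curr := by
        rcases hP with h | h
        · exact h
        · omega
      have hlo_fit : curr + lo ≤ maxSum := by
        have := pvFsum_le lo 1 k h1 (by omega) hk1
        rw [pvFsum_one] at this
        omega
      rw [if_pos hlo_fit]
      have hshiftk := pvFsum_shift lo k hk1
      have hshiftk1 := pvFsum_shift lo (k + 1) (by omega)
      have hrec := ih (k - 1) (lo + 1) hi (res + 1) (curr + lo) (by omega) (by omega) (by omega) h3
        (fun x hx1 hx2 => hnb x (by omega) hx2) (by omega) (by omega)
        (by left; omega)
        (by
          have e : (k : Int) + 1 - 1 = k - 1 + 1 := by ring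
          rw [e] at hshiftk1
          omega)
      rw [hrec]
      omega

-- Main induction over the wall list: A's scan from lo equals B's gap walk.
theorem pvMain (b banned : List Int) (n maxSum : Int)
    (hmem : ∀ x, (pvBSearch b x 0 ((b.length : Int) - 1) = true) ↔ x ∈ banned) :
    ∀ (ws : List Int) (lo res curr : Int),
      1 ≤ lo →
      (∀ x, x ∈ banned → lo ≤ x → x ≤ n → x ∈ ws) →
      (∀ w ∈ ws, lo ≤ w ∧ w ≤ n ∧ w ∈ banned) →
      ws.Pairwise (· < ·) →
      pvALoop b n maxSum lo res curr = pvBLoop n maxSum (ws ++ [n + 1]) res (maxSum - curr) lo := by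
  intro ws
  induction ws with
  | nil =>
    intro lo res curr hlo hcov _ _
    simp only [List.nil_append]
    rw [pvBLoop]
    simp only
    by_cases hle : lo ≤ n + 1 - 1
    · rw [if_pos hle]
      have hnb : ∀ x, lo ≤ x → x ≤ n + 1 - 1 → x ∉ banned := by
        intro x hx1 hx2 hxb
        exact absurd (hcov x hxb hx1 (by omega)) (List.not_mem_nil)
      rw [pvTotal_eq lo (n + 1 - 1)]
      by_cases hfit : pvFsum lo (n + 1 - 1 - lo + 1) ≤ maxSum - curr
      · rw [if_pos hfit, pvBLoop]
        have heq : (n + 1 - 1 : Int) - lo + 1 = n + 1 - lo := by ring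
        rw [heq] at hfit
        rw [pvALoop_gap_fit b banned n maxSum hmem (n + 1 - lo).toNat lo n res curr
          (by omega) hlo (by omega) (le_refl n) (fun x h1 h2 => hnb x h1 (by omega)) hfit]
        rw [pvALoop, dif_neg (by omega : ¬ n + 1 ≤ n)]
        rw [heq]
      · rw [if_neg hfit]
        have heq : (n + 1 - 1 : Int) - lo + 1 = n + 1 - lo := by ring
        rw [heq] at hfit ⊢
        obtain ⟨q1, q2, q3, q4⟩ := pvKSearch_spec lo (maxSum - curr) (n + 1 - lo).toNat 0
          (n + 1 - lo) (by omega) (by omega)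
        set r := pvKSearch lo (maxSum - curr) 0 (n + 1 - lo) with hr
        have hrs : r < n + 1 - lo := by
          rcases q3 with h | h
          · by_contra hbad
            have : r = n + 1 - lo := by omega
            rw [this] at h; exact hfit h
          · omega
        have hnP : ¬ pvFsum lo (r + 1) ≤ maxSum - curr := by
          rcases q4 with h | h
          · omega
          · exact h
        have hPr : pvFsum lo r ≤ maxSum - curr ∨ r = 0 := by
          rcases q3 with h | h
          · exact Or.inl h
          · exact Or.inr h
        exact pvALoop_gap_stop b banned n maxSum hmem r.toNat r lo n res curr (le_refl _)
          hlo (by omega) (le_refl n) (fun x h1 h2 => hnb x h1 (by omega)) q1 (by omega) hPr hnP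
    · rw [if_neg hle]
      rw [pvBLoop, pvALoop, dif_neg (by omega : ¬ lo ≤ n)]
  | cons w ws ih =>
    intro lo res curr hlo hcov hws hpw
    obtain ⟨hwlo, hwn, hwb⟩ := hws w (List.mem_cons_self)
    have hws' : ∀ v ∈ ws, w < v := by
      intro v hv
      exact (List.pairwise_cons.mp hpw).1 v hv
    have hnb : ∀ x, lo ≤ x → x ≤ w - 1 → x ∉ banned := by
      intro x hx1 hx2 hxb
      have := hcov x hxb hx1 (by omega)
      rcases List.mem_cons.mp this with h | h
      · omega
      · have := hws' x h; omega
    have hcov' : ∀ x, x ∈ banned → w + 1 ≤ x → x ≤ n → x ∈ ws := by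
      intro x hxb hx1 hx2
      have := hcov x hxb (by omega) hx2
      rcases List.mem_cons.mp this with h | h
      · omega
      · exact h
    have hws2 : ∀ v ∈ ws, w + 1 ≤ v ∧ v ≤ n ∧ v ∈ banned := by
      intro v hv
      obtain ⟨_, h2, h3⟩ := hws v (List.mem_cons_of_mem _ hv)
      exact ⟨by have := hws' v hv; omega, h2, h3⟩
    have hpw' : ws.Pairwise (· < ·) := (List.pairwise_cons.mp hpw).2
    simp only [List.cons_append]
    rw [pvBLoop]
    simp only
    by_cases hle : lo ≤ w - 1
    · rw [if_pos hle]
      rw [pvTotal_eq lo (w - 1)]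
      by_cases hfit : pvFsum lo (w - 1 - lo + 1) ≤ maxSum - curr
      · rw [if_pos hfit]
        have heq : (w - 1 : Int) - lo + 1 = w - lo := by ring
        rw [heq] at hfit ⊢
        have heq2 : (w : Int) - 1 + 1 - lo = w - lo := by ring
        have heq3 : (w : Int) - 1 + 1 = w := by ring
        rw [pvALoop_gap_fit b banned n maxSum hmem (w - lo).toNat lo (w - 1) res curr
          (by omega) hlo (by omega) (by omega) hnb (by rw [heq2]; exact hfit)]
        rw [heq2, heq3]
        -- now A is at num = w, which is banned: skip it
        rw [pvALoop, dif_pos (by omega : w ≤ n)]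
        have hbw : pvBSearch b w 0 ((b.length : Int) - 1) = true := by
          rw [hmem]; exact hwb
        rw [hbw]
        simp only [if_true]
        have hmain := ih (w + 1) (res + (w - lo)) (curr + pvFsum lo (w - lo)) (by omega)
          (by intro x h1 h2 h3; exact hcov' x h1 (by omega) h3)
          (by intro v hv; have hv2 := hws2 v hv; exact ⟨by omega, hv2.2.1, hv2.2.2⟩)
          hpw'
        rw [hmain]
        congr 1
        omega
      · rw [if_neg hfit]
        have heq : (w - 1 : Int) - lo + 1 = w - lo := by ring
        rw [heq] at hfit ⊢
        obtain ⟨q1, q2, q3, q4⟩ := pvKSearch_spec lo (maxSum - curr) (w - lo).toNat 0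
          (w - lo) (by omega) (by omega)
        set r := pvKSearch lo (maxSum - curr) 0 (w - lo) with hr
        have hrs : r < w - lo := by
          rcases q3 with h | h
          · by_contra hbad
            have : r = w - lo := by omega
            rw [this] at h; exact hfit h
          · omega
        have hnP : ¬ pvFsum lo (r + 1) ≤ maxSum - curr := by
          rcases q4 with h | h
          · omega
          · exact h
        have hPr : pvFsum lo r ≤ maxSum - curr ∨ r = 0 := by
          rcases q3 with h | h
          · exact Or.inl h
          · exact Or.inr h
        exact pvALoop_gap_stop b banned n maxSum hmem r.toNat r lo (w - 1) res curr (le_refl _)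
          hlo (by omega) (by omega) hnb q1 (by omega) hPr hnP
    · rw [if_neg hle]
      -- empty gap: lo = w (lo ≤ w and lo > w - 1); A skips the banned w
      have hlow : lo = w := by omega
      subst hlow
      rw [pvALoop, dif_pos (by omega : lo ≤ n)]
      have hbw : pvBSearch b lo 0 ((b.length : Int) - 1) = true := by
        rw [hmem]; exact hwb
      rw [hbw]
      simp only [if_true]
      exact ih (lo + 1) res curr (by omega)
        (by intro x h1 h2 h3; exact hcov' x h1 (by omega) h3)
        (by intro v hv; have := hws2 v hv; omega)
        hpw'

-- ===== VERDICT (by name: the statement is the Claim_ definition above) =====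
theorem maxCount_binary_search_spec : Claim_equal_maxCount_binary_search := by
  intro banned n maxSum _
  unfold Spec_maxCount_binary_search maxCount_binary_search maxCount_binary_search_alt
  set b := PySem.List.sorted banned (fun x => x) false with hb
  set walls := PySem.List.sorted
    (PySem.Set.ofList (banned.filter (fun x => decide (1 ≤ x) && decide (x ≤ n))))
    (fun x => x) false with hw
  have hmemw : ∀ x, x ∈ walls ↔ (x ∈ banned ∧ 1 ≤ x ∧ x ≤ n) := by
    intro x
    rw [hw, PySem.List.mem_sorted, PySem.Set.mem_ofList, List.mem_filter]
    simp
  have hpw : walls.Pairwise (· < ·) := by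
    rw [hw]
    exact PySem.List.sorted_ofList_pairwise_lt _
  have hmem : ∀ x, (pvBSearch b x 0 ((b.length : Int) - 1) = true) ↔ x ∈ banned :=
    fun x => pvBSearch_mem banned x
  have := pvMain b banned n maxSum hmem walls 1 0 0 (le_refl 1)
    (fun x hxb hx1 hx2 => (hmemw x).mpr ⟨hxb, hx1, hx2⟩)
    (fun w hw' => by have := (hmemw w).mp hw'; exact ⟨this.2.1, this.2.2, this.1⟩)
    hpw
  rw [(by omega : maxSum - 0 = maxSum)] at this
  exact this
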